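-- pv_equiv track=rewrite | github.com/simrangoyal2873/new-healthcare-rag | app.py | format_healthcare_answer
-- ===== SOURCE A (Python) =====
-- def format_healthcare_answer(query: str, docs: list[str], metas: list[dict]) -> str:
--     """Format results for healthcare domain."""
--     table_texts = [(d, m) for d, m in zip(docs, metas) if m.get("type") == "table"]
--     if table_texts:
--         out = ["**Lab Results Summary**"]
--         for d, m in table_texts:
--             out.append(d[:500] + ("..." if len(d) > 500 else ""))
--         return "\n".join(out)
--
--     chart_texts = [(d, m) for d, m in zip(docs, metas) if m.get("type") in ["chart", "chart_semantic"]]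
--     if chart_texts:
--         out = ["**Chart Summary**"]
--         for d, m in chart_texts[:3]:
--             out.append(f"- Page {m.get('page','?')}: " + d[:300] + ("..." if len(d) > 300 else ""))
--         return "\n".join(out)
--
--     text_snips = [d for d, m in zip(docs, metas) if m.get("type") == "text"]
--     if text_snips:
--         return "\n".join(text_snips[:2])
--
--     return "No relevant content found."
-- ===== SOURCE B (Python) =====
-- def format_healthcare_answer(query: str, docs: list[str], metas: list[dict]) -> str:
--     """Format results for healthcare domain.
--
--     One grouping pass over zip(docs, metas) into category buckets, then a
--     single priority dispatch (table > chart > text).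
--     """
--     buckets = {"table": [], "chart": [], "text": []}
--     for d, m in zip(docs, metas):
--         t = m.get("type")
--         if t in ("chart", "chart_semantic"):
--             t = "chart"
--         if t in buckets:
--             buckets[t].append((d, m))
--
--     if buckets["table"]:
--         lines = ["**Lab Results Summary**"]
--         for d, m in buckets["table"]:
--             lines.append(d[:500] + ("..." if len(d) > 500 else ""))
--         return "\n".join(lines)
--     if buckets["chart"]:
--         lines = ["**Chart Summary**"]
--         for d, m in buckets["chart"][:3]:
--             lines.append(f"- Page {m.get('page','?')}: " + d[:300] + ("..." if len(d) > 300 else ""))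
--         return "\n".join(lines)
--     if buckets["text"]:
--         return "\n".join(d for d, m in buckets["text"][:2])
--     return "No relevant content found."
-- ===== Notes on version B (the rewrite author's own statement) =====
-- stated objective: alternative
-- what changed: Replaces A's three separate filter comprehensions over zip(docs, metas) by a single grouping pass that appends each pair into a dict of category buckets (collapsing chart/chart_semantic), followed by one priority dispatch over the buckets.
import Mathlib
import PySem

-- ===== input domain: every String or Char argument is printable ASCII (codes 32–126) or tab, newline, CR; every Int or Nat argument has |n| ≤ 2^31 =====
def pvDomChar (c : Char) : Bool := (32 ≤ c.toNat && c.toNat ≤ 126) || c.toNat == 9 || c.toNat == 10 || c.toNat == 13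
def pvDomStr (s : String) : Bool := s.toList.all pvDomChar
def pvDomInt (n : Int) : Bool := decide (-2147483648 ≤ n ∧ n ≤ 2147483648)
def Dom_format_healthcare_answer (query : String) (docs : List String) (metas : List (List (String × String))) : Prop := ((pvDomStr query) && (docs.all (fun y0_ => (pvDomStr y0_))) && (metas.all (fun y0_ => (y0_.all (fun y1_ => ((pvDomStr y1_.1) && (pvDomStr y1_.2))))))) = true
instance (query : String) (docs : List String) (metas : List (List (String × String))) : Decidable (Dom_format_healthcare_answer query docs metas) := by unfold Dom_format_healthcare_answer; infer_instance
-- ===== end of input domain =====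

-- B replaces A's three filter scans over zip(docs, metas) by a single grouping pass into
-- category buckets plus one priority dispatch (objective: alternative decomposition, same cost).

-- ===== PORT A =====
-- m.get(k): first-match lookup on the association list (dict convention)
def fhaGet (m : List (String × String)) (k : String) : Option String :=
  List.lookup k m

def format_healthcare_answer (query : String) (docs : List String) (metas : List (List (String × String))) : String :=
  let pairs := docs.zip metas
  let table_texts := pairs.filter (fun dm => fhaGet dm.2 "type" == some "table")
  if table_texts ≠ [] then
    let out := ["**Lab Results Summary**"] ++
      table_texts.map (fun dm =>
        PySem.Str.slice dm.1 none (some 500) ++ (if PySem.Str.len dm.1 > 500 then "..." else ""))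
    PySem.Str.join "\n" out
  else
    let chart_texts := pairs.filter (fun dm =>
      fhaGet dm.2 "type" == some "chart" || fhaGet dm.2 "type" == some "chart_semantic")
    if chart_texts ≠ [] then
      let out := ["**Chart Summary**"] ++
        (PySem.List.slice chart_texts none (some 3)).map (fun dm =>
          "- Page " ++ ((fhaGet dm.2 "page").getD "?") ++ ": " ++
          PySem.Str.slice dm.1 none (some 300) ++ (if PySem.Str.len dm.1 > 300 then "..." else ""))
      PySem.Str.join "\n" out
    else
      let text_snips := (pairs.filter (fun dm => fhaGet dm.2 "type" == some "text")).map (fun dm => dm.1)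
      if text_snips ≠ [] then
        PySem.Str.join "\n" (PySem.List.slice text_snips none (some 2))
      else
        "No relevant content found."

-- ===== PORT B =====
-- one grouping step: route one (doc, meta) pair into the (table, chart, text) buckets
def fhaStep (acc : List (String × List (String × String)) × List (String × List (String × String)) × List (String × List (String × String)))
    (dm : String × List (String × String)) :
    List (String × List (String × String)) × List (String × List (String × String)) × List (String × List (String × String)) :=
  match List.lookup "type" dm.2 with
  | some t =>
      let t := if t == "chart" || t == "chart_semantic" then "chart" else t
      if t == "table" then (acc.1 ++ [dm], acc.2.1, acc.2.2)
      else if t == "chart" then (acc.1, acc.2.1 ++ [dm], acc.2.2)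
      else if t == "text" then (acc.1, acc.2.1, acc.2.2 ++ [dm])
      else acc
  | none => acc

-- one pass over zip(docs, metas): the three category buckets, in encounter order
def fhaBuckets (pairs : List (String × List (String × String))) :
    List (String × List (String × String)) × List (String × List (String × String)) × List (String × List (String × String)) :=
  pairs.foldl fhaStep ([], [], [])

def format_healthcare_answer_alt (query : String) (docs : List String) (metas : List (List (String × String))) : String :=
  let b := fhaBuckets (docs.zip metas)
  if b.1 ≠ [] then
    PySem.Str.join "\n" ("**Lab Results Summary**" ::
      b.1.map (fun dm =>
        PySem.Str.slice dm.1 none (some 500) ++ (if PySem.Str.len dm.1 > 500 then "..." else "")))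
  else if b.2.1 ≠ [] then
    PySem.Str.join "\n" ("**Chart Summary**" ::
      (b.2.1.take 3).map (fun dm =>
        "- Page " ++ ((List.lookup "page" dm.2).getD "?") ++ ": " ++
        PySem.Str.slice dm.1 none (some 300) ++ (if PySem.Str.len dm.1 > 300 then "..." else "")))
  else if b.2.2 ≠ [] then
    PySem.Str.join "\n" ((b.2.2.take 2).map (fun dm => dm.1))
  else
    "No relevant content found."

-- ===== PRECONDITION & SPEC =====
def Spec_format_healthcare_answer (query : String) (docs : List String) (metas : List (List (String × String))) (out : String) : Prop := out = format_healthcare_answer_alt query docs metas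
instance (query : String) (docs : List String) (metas : List (List (String × String))) (out : String) : Decidable (Spec_format_healthcare_answer query docs metas out) := by unfold Spec_format_healthcare_answer; infer_instance

-- ===== CLAIM (what is proved, stated in full; the proofs are below) =====
def Claim_equal_format_healthcare_answer : Prop := ∀ (query : String) (docs : List String) (metas : List (List (String × String))), Dom_format_healthcare_answer query docs metas → Spec_format_healthcare_answer query docs metas (format_healthcare_answer query docs metas)

-- ===== LEMMAS AND PROOFS =====

-- the grouping fold produces exactly A's three filtered lists (in order)
theorem fhaBuckets_go (pairs : List (String × List (String × String)))
    (t c x : List (String × List (String × String))) :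
    pairs.foldl fhaStep (t, c, x) =
      (t ++ pairs.filter (fun dm => List.lookup "type" dm.2 == some "table"),
       c ++ pairs.filter (fun dm => List.lookup "type" dm.2 == some "chart" || List.lookup "type" dm.2 == some "chart_semantic"),
       x ++ pairs.filter (fun dm => List.lookup "type" dm.2 == some "text")) := by
  induction pairs generalizing t c x with
  | nil => simp
  | cons dm rest ih =>
    rw [List.foldl_cons]
    rcases h : List.lookup "type" dm.2 with _ | s
    · rw [show fhaStep (t, c, x) dm = (t, c, x) from by simp [fhaStep, h], ih]
      simp [h]
    · by_cases h1 : s = "table"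
      · subst h1
        rw [show fhaStep (t, c, x) dm = (t ++ [dm], c, x) from by simp [fhaStep, h], ih]
        simp [h]
      · by_cases h2 : s = "chart" ∨ s = "chart_semantic"
        · rw [show fhaStep (t, c, x) dm = (t, c ++ [dm], x) from by
            rcases h2 with h2 | h2 <;> subst h2 <;> simp [fhaStep, h], ih]
          rcases h2 with h2 | h2 <;> subst h2 <;> simp [h]
        · push_neg at h2
          by_cases h3 : s = "text"
          · subst h3
            rw [show fhaStep (t, c, x) dm = (t, c, x ++ [dm]) from by simp [fhaStep, h], ih]
            simp [h]
          · rw [show fhaStep (t, c, x) dm = (t, c, x) from by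
              simp [fhaStep, h, h1, h2.1, h2.2, h3], ih]
            simp [h, h1, h2.1, h2.2, h3]

-- ===== VERDICT (by name: the statement is the Claim_ definition above) =====
theorem format_healthcare_answer_spec : Claim_equal_format_healthcare_answer := by
  intro query docs metas _
  show format_healthcare_answer query docs metas = format_healthcare_answer_alt query docs metas
  unfold format_healthcare_answer format_healthcare_answer_alt fhaBuckets fhaGet
  rw [fhaBuckets_go]
  simp only [List.nil_append, List.singleton_append, ne_eq]
  rw [PySem.List.slice_to _ (by norm_num), PySem.List.slice_to _ (by norm_num)]
  norm_num
  split_ifs with h1 h2 h3 h4 <;>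
    simp_all [List.map_take, List.map_eq_nil_iff]
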